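-- pv_equiv track=rewrite | github.com/A-Ravioli/ml-from-scratch | 00-mathematical-foundations/02-analysis/03-measure-theory/solutions/solution.py | is_sigma_algebra
-- ===== SOURCE A (Python) =====
-- from typing import List, Set, Dict, Callable
--
-- def is_sigma_algebra(omega: Set, F: List[Set]) -> bool:
--     O = set(omega)
--     coll = [set(A) for A in F]
--     # 1) Contains empty and omega
--     if set() not in coll:
--         return False
--     if O not in coll:
--         return False
--     # 2) Closed under complement
--     for A in coll:
--         if (O - A) not in coll:
--             return False
--     # 3) Closed under unions (finite suffice)
--     for A in coll:
--         for B in coll: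
--             if (A | B) not in coll:
--                 return False
--     return True
-- ===== SOURCE B (Python) =====
-- def is_sigma_algebra(omega, F):
--     # Construct the sigma-algebra GENERATED by F (seeded with the empty set and
--     # omega) as a least fixpoint: repeatedly close the current collection under
--     # relative complement and pairwise union until it stabilizes, then answer
--     # with one equality test against the family.  Since the closure only ever
--     # grows and always contains the family, the fixpoint iteration is pruned as
--     # soon as the closure outgrows the family: the equality test could never
--     # succeed afterwards.
--     O = frozenset(omega)
--     family = {frozenset(A) for A in F}
--     closure = family | {frozenset(), O}
--     while True:
--         if len(closure) > len(family):
--             return False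
--         new = closure | {O - A for A in closure} | {A | B for A in closure for B in closure}
--         if len(new) == len(closure):
--             break
--         closure = new
--     return closure == family
-- ===== Notes on version B (the rewrite author's own statement) =====
-- stated objective: alternative
-- what changed: A verifies the three sigma-algebra closure properties directly with staged early-return membership scans; B instead constructs the sigma-algebra GENERATED by F (seeded with the empty set and omega) as a least fixpoint - repeatedly adding all relative complements and pairwise unions until the collection stabilizes - and returns one equality test of that generated closure against the family.
import Mathlib
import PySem

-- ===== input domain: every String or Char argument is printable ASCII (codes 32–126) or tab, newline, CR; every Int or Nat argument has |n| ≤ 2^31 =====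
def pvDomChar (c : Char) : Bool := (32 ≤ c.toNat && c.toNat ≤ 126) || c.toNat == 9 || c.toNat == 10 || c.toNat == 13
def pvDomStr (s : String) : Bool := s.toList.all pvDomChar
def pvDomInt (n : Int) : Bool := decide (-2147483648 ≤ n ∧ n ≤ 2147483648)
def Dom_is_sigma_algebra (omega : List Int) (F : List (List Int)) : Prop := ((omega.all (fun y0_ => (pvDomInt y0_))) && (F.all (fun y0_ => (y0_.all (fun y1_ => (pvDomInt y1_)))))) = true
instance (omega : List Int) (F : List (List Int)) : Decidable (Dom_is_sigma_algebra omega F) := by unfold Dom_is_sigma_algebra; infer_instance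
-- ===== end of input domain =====

-- B replaces A's direct closure-verification passes by constructing the sigma-algebra
-- GENERATED by F (seeded with emptyset and omega) as a least fixpoint and testing it
-- for equality with the family (objective: alternative algorithm, same cost on valid input).


-- ===== PORT A =====
-- Python list membership 'X in coll' over a list of sets: linear scan with set equality
def pvMemColl (coll : List (PySem.Set Int)) (X : PySem.Set Int) : Bool :=
  coll.any (fun C => PySem.Set.equal C X)

def is_sigma_algebra (omega : List Int) (F : List (List Int)) : Bool :=
  let O := PySem.Set.ofList omega
  let coll := F.map (fun A => PySem.Set.ofList A)
  -- 1) Contains empty and omega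
  if !(pvMemColl coll PySem.Set.empty) then false
  else if !(pvMemColl coll O) then false
  -- 2) Closed under complement
  else if !(coll.all (fun A => pvMemColl coll (PySem.Set.diff O A))) then false
  -- 3) Closed under unions
  else if !(coll.all (fun A => coll.all (fun B => pvMemColl coll (PySem.Set.union A B)))) then false
  else true

-- ===== PORT B =====
-- frozenset is modelled as its canonical form: the strictly increasing list of its
-- elements, so frozenset equality is exactly list equality (exact for Int elements).
def pvCanon (A : List Int) : List Int :=
  PySem.List.sorted (PySem.Set.ofList A) (fun x => x)

-- one round of the fixpoint: current collection, plus all relative complements,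
-- plus all pairwise unions (Python's  closure | {O-A for A} | {A|B for A for B})
def pvStep (O : List Int) (c : PySem.Set (List Int)) : PySem.Set (List Int) :=
  c.foldl (fun T A => c.foldl (fun T' B => PySem.Set.add T' (pvCanon (PySem.Set.union A B))) T)
    (c.foldl (fun T A => PySem.Set.add T (pvCanon (PySem.Set.diff O A))) c)

-- Python's  while True: if len(closure) > len(family): return False (= none);
--           new = …; if len(new) == len(closure): break (= some closure); closure = new
-- (fuel is only the totality device: the closure grows by at least one per round and the
-- pruning check stops it at len(family)+1, so F.length + 2 rounds always suffice)
def pvIter (O : List Int) (flen : Int) : Nat → PySem.Set (List Int) → Option (PySem.Set (List Int))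
  | 0, _ => none
  | Nat.succ n, c =>
      if flen < PySem.Set.len c then none
      else if PySem.Set.len (pvStep O c) = PySem.Set.len c then some c
      else pvIter O flen n (pvStep O c)

def is_sigma_algebra_alt (omega : List Int) (F : List (List Int)) : Bool :=
  match pvIter (pvCanon omega) (PySem.Set.len (PySem.Set.ofList (F.map pvCanon)))
      (F.length + 2)
      (PySem.Set.add (PySem.Set.add (PySem.Set.ofList (F.map pvCanon)) (pvCanon [])) (pvCanon omega)) with
  | none => false
  | some cl => PySem.Set.equal cl (PySem.Set.ofList (F.map pvCanon))

-- ===== PRECONDITION & SPEC =====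
def Spec_is_sigma_algebra (omega : List Int) (F : List (List Int)) (out : Bool) : Prop := out = is_sigma_algebra_alt omega F
instance (omega : List Int) (F : List (List Int)) (out : Bool) : Decidable (Spec_is_sigma_algebra omega F out) := by unfold Spec_is_sigma_algebra; infer_instance

-- ===== CLAIM (what is proved, stated in full; the proofs are below) =====
def Claim_equal_is_sigma_algebra : Prop := ∀ (omega : List Int) (F : List (List Int)), Dom_is_sigma_algebra omega F → Spec_is_sigma_algebra omega F (is_sigma_algebra omega F)

-- ===== LEMMAS AND PROOFS =====

-- the common membership-level reading of the sigma-algebra conditions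
def pvConds (omega : List Int) (F : List (List Int)) : Prop :=
  (∃ A ∈ F, ∀ x : Int, x ∉ A)
  ∧ (∃ A ∈ F, ∀ x : Int, x ∈ A ↔ x ∈ omega)
  ∧ (∀ A ∈ F, ∃ C ∈ F, ∀ x : Int, x ∈ C ↔ (x ∈ omega ∧ x ∉ A))
  ∧ (∀ A ∈ F, ∀ B ∈ F, ∃ C ∈ F, ∀ x : Int, x ∈ C ↔ (x ∈ A ∨ x ∈ B))

theorem pvMemColl_iff (F : List (List Int)) (X : PySem.Set Int) :
    pvMemColl (F.map (fun A => PySem.Set.ofList A)) X = true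
      ↔ ∃ A ∈ F, ∀ x : Int, x ∈ A ↔ x ∈ X := by
  simp only [pvMemColl, List.any_map, List.any_eq_true, Function.comp]
  constructor
  · rintro ⟨A, hA, hEq⟩
    exact ⟨A, hA, fun x => by
      have := (PySem.Set.equal_iff _ _).1 hEq x
      simpa [PySem.Set.mem_ofList] using this⟩
  · rintro ⟨A, hA, hEq⟩
    exact ⟨A, hA, (PySem.Set.equal_iff _ _).2 (fun x => by
      simpa [PySem.Set.mem_ofList] using hEq x)⟩

theorem pv_if_and (c X : Bool) : (if (!c) = true then false else X) = (c && X) := by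
  cases c <;> simp

theorem pvA_iff (omega : List Int) (F : List (List Int)) :
    is_sigma_algebra omega F = true ↔ pvConds omega F := by
  unfold is_sigma_algebra pvConds
  dsimp only
  rw [pv_if_and, pv_if_and, pv_if_and, pv_if_and]
  simp only [Bool.and_eq_true, Bool.and_true, List.all_map, List.all_eq_true,
    Function.comp, pvMemColl_iff, PySem.Set.mem_ofList, PySem.Set.mem_diff,
    PySem.Set.mem_union, PySem.Set.empty, List.not_mem_nil, iff_false]

@[simp] theorem pvCanon_mem (A : List Int) (x : Int) : x ∈ pvCanon A ↔ x ∈ A := by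
  simp [pvCanon, PySem.List.mem_sorted, PySem.Set.mem_ofList]

theorem pvCanon_pairwise (A : List Int) : (pvCanon A).Pairwise (· < ·) :=
  PySem.List.sorted_ofList_pairwise_lt A

theorem pvCanon_eq_iff (A B : List Int) :
    pvCanon A = pvCanon B ↔ ∀ x : Int, x ∈ A ↔ x ∈ B := by
  constructor
  · intro h x
    rw [← pvCanon_mem, h, pvCanon_mem]
  · intro h
    have h1 := pvCanon_pairwise A
    have h2 := pvCanon_pairwise B
    have hp : (pvCanon A).Perm (pvCanon B) :=
      (List.perm_ext_iff_of_nodup h1.nodup h2.nodup).2 (by simpa using h)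
    exact hp.eq_of_pairwise (fun a b _ _ hab hba => le_antisymm hab.le hba.le) h1 h2

theorem pvCanon_mem_S (F : List (List Int)) (X : List Int) :
    pvCanon X ∈ PySem.Set.ofList (F.map pvCanon)
      ↔ ∃ A ∈ F, ∀ x : Int, x ∈ A ↔ x ∈ X := by
  simp only [PySem.Set.mem_ofList, List.mem_map]
  constructor
  · rintro ⟨A0, hA0, hEq⟩
    exact ⟨A0, hA0, (pvCanon_eq_iff A0 X).1 hEq⟩
  · rintro ⟨A0, hA0, hEq⟩
    exact ⟨A0, hA0, (pvCanon_eq_iff A0 X).2 hEq⟩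

theorem pv_mem_foldl {β : Type} (step : PySem.Set (List Int) → β → PySem.Set (List Int))
    (Q : β → List Int → Prop)
    (hstep : ∀ T A Y, Y ∈ step T A ↔ Y ∈ T ∨ Q A Y) :
    ∀ (l : List β) (T : PySem.Set (List Int)) (Y : List Int),
      Y ∈ l.foldl step T ↔ Y ∈ T ∨ ∃ A ∈ l, Q A Y := by
  intro l
  induction l with
  | nil => simp
  | cons A l ih =>
    intro T Y
    simp only [List.foldl_cons, ih, hstep, List.mem_cons]
    constructor
    · rintro (⟨h | h⟩ | ⟨B, hB, h⟩)
      · exact Or.inl h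
      · exact Or.inr ⟨A, Or.inl rfl, h⟩
      · exact Or.inr ⟨B, Or.inr hB, h⟩
    · rintro (h | ⟨B, hB | hB, h⟩)
      · exact Or.inl (Or.inl h)
      · exact Or.inl (Or.inr (hB ▸ h))
      · exact Or.inr ⟨B, hB, h⟩

theorem pv_foldl_prefix {β : Type} (g : PySem.Set (List Int) → β → PySem.Set (List Int))
    (hg : ∀ T b, ∃ r, g T b = T ++ r) :
    ∀ (l : List β) (T : PySem.Set (List Int)), ∃ r, l.foldl g T = T ++ r := by
  intro l
  induction l with
  | nil => intro T; exact ⟨[], by simp⟩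
  | cons b l ih =>
    intro T
    obtain ⟨r1, h1⟩ := hg T b
    obtain ⟨r2, h2⟩ := ih (g T b)
    exact ⟨r1 ++ r2, by rw [List.foldl_cons, h2, h1, List.append_assoc]⟩

theorem pv_add_prefix (T : PySem.Set (List Int)) (x : List Int) :
    ∃ r, PySem.Set.add T x = T ++ r := by
  rw [PySem.Set.add_eq_ite]
  by_cases h : x ∈ T
  · exact ⟨[], by simp [h]⟩
  · exact ⟨[x], by simp [h]⟩

theorem pvStep_prefix (O : List Int) (c : PySem.Set (List Int)) :
    ∃ r, pvStep O c = c ++ r := by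
  unfold pvStep
  obtain ⟨r1, h1⟩ := pv_foldl_prefix
    (fun T A => PySem.Set.add T (pvCanon (PySem.Set.diff O A)))
    (fun T A => pv_add_prefix T _) c c
  obtain ⟨r2, h2⟩ := pv_foldl_prefix
    (fun T A => c.foldl (fun T' B => PySem.Set.add T' (pvCanon (PySem.Set.union A B))) T)
    (fun T A => pv_foldl_prefix (fun T' B => PySem.Set.add T' (pvCanon (PySem.Set.union A B)))
      (fun T' B => pv_add_prefix T' _) c T) c
    (c.foldl (fun T A => PySem.Set.add T (pvCanon (PySem.Set.diff O A))) c)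
  exact ⟨r1 ++ r2, by rw [h2, h1, List.append_assoc]⟩

theorem pvStep_mem (O : List Int) (c : PySem.Set (List Int)) (Y : List Int) :
    Y ∈ pvStep O c ↔ Y ∈ c ∨ (∃ A ∈ c, Y = pvCanon (PySem.Set.diff O A))
      ∨ (∃ A ∈ c, ∃ B ∈ c, Y = pvCanon (PySem.Set.union A B)) := by
  unfold pvStep
  have hInner : ∀ (A : List Int) (T : PySem.Set (List Int)) (Z : List Int),
      Z ∈ c.foldl (fun T' B => PySem.Set.add T' (pvCanon (PySem.Set.union A B))) T
        ↔ Z ∈ T ∨ ∃ B ∈ c, Z = pvCanon (PySem.Set.union A B) := by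
    intro A
    exact pv_mem_foldl _ (fun B Z => Z = pvCanon (PySem.Set.union A B))
      (fun T B Z => PySem.Set.mem_add T _ Z) c
  rw [pv_mem_foldl
    (fun T A => c.foldl (fun T' B => PySem.Set.add T' (pvCanon (PySem.Set.union A B))) T)
    (fun A Y => ∃ B ∈ c, Y = pvCanon (PySem.Set.union A B))
    (fun T A Y => hInner A T Y) c]
  rw [pv_mem_foldl
    (fun T A => PySem.Set.add T (pvCanon (PySem.Set.diff O A)))
    (fun A Y => Y = pvCanon (PySem.Set.diff O A))
    (fun T A Y => PySem.Set.mem_add T _ Y) c]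
  exact or_assoc

theorem pv_nodup_foldl {β : Type} (g : PySem.Set (List Int) → β → PySem.Set (List Int))
    (hg : ∀ T b, T.Nodup → (g T b).Nodup) :
    ∀ (l : List β) (T : PySem.Set (List Int)), T.Nodup → (l.foldl g T).Nodup := by
  intro l
  induction l with
  | nil => intro T h; simpa using h
  | cons b l ih => intro T h; exact ih _ (hg T b h)

theorem pvStep_nodup (O : List Int) (c : PySem.Set (List Int)) (h : c.Nodup) :
    (pvStep O c).Nodup := by
  unfold pvStep
  apply pv_nodup_foldl _ (fun T A hT => pv_nodup_foldl _
    (fun T' B hT' => PySem.Set.nodup_add T' _ hT') c T hT) c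
  exact pv_nodup_foldl _ (fun T A hT => PySem.Set.nodup_add T _ hT) c c h

-- closure under the two generating operations, membership-level
def pvClosed (O : List Int) (c : PySem.Set (List Int)) : Prop :=
  (∀ A ∈ c, pvCanon (PySem.Set.diff O A) ∈ c)
  ∧ (∀ A ∈ c, ∀ B ∈ c, pvCanon (PySem.Set.union A B) ∈ c)

theorem pvClosed_of_fix (O : List Int) (c : PySem.Set (List Int))
    (h : pvStep O c = c) : pvClosed O c := by
  constructor
  · intro A hA
    rw [← h, pvStep_mem]
    exact Or.inr (Or.inl ⟨A, hA, rfl⟩)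
  · intro A hA B hB
    rw [← h, pvStep_mem]
    exact Or.inr (Or.inr ⟨A, hA, B, hB, rfl⟩)

theorem pvFix_of_closed (O : List Int) (c : PySem.Set (List Int))
    (hn : c.Nodup) (h : pvClosed O c) : pvStep O c = c := by
  obtain ⟨r, hr⟩ := pvStep_prefix O c
  cases r with
  | nil => simpa using hr
  | cons y r =>
    exfalso
    have hy : y ∈ pvStep O c := by rw [hr]; simp
    have hyc : y ∈ c := by
      rcases (pvStep_mem O c y).1 hy with h1 | ⟨A, hA, rfl⟩ | ⟨A, hA, B, hB, rfl⟩
      · exact h1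
      · exact h.1 A hA
      · exact h.2 A hA B hB
    have hnd : (c ++ y :: r).Nodup := hr ▸ pvStep_nodup O c hn
    rw [List.nodup_append] at hnd
    exact hnd.2.2 y hyc y (by simp) rfl

theorem pvStep_eq_of_len (O : List Int) (c : PySem.Set (List Int))
    (h : PySem.Set.len (pvStep O c) = PySem.Set.len c) : pvStep O c = c := by
  obtain ⟨r, hr⟩ := pvStep_prefix O c
  simp only [PySem.Set.len, hr, List.length_append] at h
  have : r.length = 0 := by omega
  rw [hr, List.length_eq_zero_iff.1 this, List.append_nil]

theorem pvIter_sound (O : List Int) (flen : Int) :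
    ∀ (fuel : Nat) (c cl : PySem.Set (List Int)),
      pvIter O flen fuel c = some cl →
      pvStep O cl = cl ∧ ∀ Y ∈ c, Y ∈ cl := by
  intro fuel
  induction fuel with
  | zero => intro c cl h; simp [pvIter] at h
  | succ n ih =>
    intro c cl h
    rw [pvIter] at h
    split at h
    · exact absurd h (by simp)
    · split at h
      · next hlen =>
        obtain rfl : c = cl := by simpa using h
        exact ⟨pvStep_eq_of_len O c hlen, fun Y hY => hY⟩
      · have hrec := ih _ _ h
        refine ⟨hrec.1, fun Y hY => hrec.2 Y ?_⟩
        obtain ⟨r, hr⟩ := pvStep_prefix O c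
        rw [hr]
        exact List.mem_append_left _ hY

theorem pvIter_ret (O : List Int) (flen : Int) (c : PySem.Set (List Int))
    (hlen : ¬ flen < PySem.Set.len c) (h : pvStep O c = c) :
    ∀ fuel, 1 ≤ fuel → pvIter O flen fuel c = some c := by
  intro fuel hf
  cases fuel with
  | zero => omega
  | succ n => rw [pvIter, if_neg hlen, h, if_pos rfl]

theorem pvB_iff (omega : List Int) (F : List (List Int)) :
    is_sigma_algebra_alt omega F = true ↔ pvConds omega F := by
  unfold is_sigma_algebra_alt
  set O := pvCanon omega with hO
  set family : PySem.Set (List Int) := PySem.Set.ofList (F.map pvCanon) with hS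
  set flen := PySem.Set.len family with hflen
  set init := PySem.Set.add (PySem.Set.add family (pvCanon [])) O with hinit
  set fuel := F.length + 2 with hfuel
  have hmemS : ∀ A ∈ F, pvCanon A ∈ family := by
    intro A hA
    rw [hS, PySem.Set.mem_ofList, List.mem_map]
    exact ⟨A, hA, rfl⟩
  constructor
  · intro h
    cases hit : pvIter O flen fuel init with
    | none => rw [hit] at h; simp at h
    | some cl =>
      rw [hit] at h
      have hsound := pvIter_sound O flen fuel init cl hit
      have hfix := hsound.1
      have hmono := hsound.2
      have heq := (PySem.Set.equal_iff cl family).1 h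
      have hclA := (pvClosed_of_fix O cl hfix).1
      have hclU := (pvClosed_of_fix O cl hfix).2
      have hIn : ∀ Y ∈ init, Y ∈ family := fun Y hY => (heq Y).1 (hmono Y hY)
      have hFam : ∀ Y ∈ family, Y ∈ cl := fun Y hY =>
        hmono Y (by rw [hinit]; simp [PySem.Set.mem_add]; tauto)
      refine ⟨?_, ?_, ?_, ?_⟩
      · have : pvCanon [] ∈ family := hIn _ (by rw [hinit]; simp [PySem.Set.mem_add])
        obtain ⟨A0, hA0, hEq⟩ := (pvCanon_mem_S F []).1 this
        exact ⟨A0, hA0, fun x hx => by have := (hEq x).1 hx; simp at this⟩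
      · have : O ∈ family := hIn _ (by rw [hinit]; simp [PySem.Set.mem_add])
        rw [hO] at this
        exact (pvCanon_mem_S F omega).1 this
      · intro A hA
        have h1 : pvCanon (PySem.Set.diff O (pvCanon A)) ∈ family :=
          (heq _).1 (hclA _ (hFam _ (hmemS A hA)))
        obtain ⟨C, hC, hEq⟩ := (pvCanon_mem_S F _).1 h1
        exact ⟨C, hC, fun x => by
          simpa [PySem.Set.mem_diff, hO] using hEq x⟩
      · intro A hA B hB
        have h1 : pvCanon (PySem.Set.union (pvCanon A) (pvCanon B)) ∈ family :=
          (heq _).1 (hclU _ (hFam _ (hmemS A hA)) _ (hFam _ (hmemS B hB)))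
        obtain ⟨C, hC, hEq⟩ := (pvCanon_mem_S F _).1 h1
        exact ⟨C, hC, fun x => by
          simpa [PySem.Set.mem_union] using hEq x⟩
  · rintro ⟨c1, c2, c3, c4⟩
    have hO_mem : O ∈ family := by rw [hO]; exact (pvCanon_mem_S F omega).2 c2
    have hempty_mem : pvCanon [] ∈ family := by
      obtain ⟨A0, hA0, hA0e⟩ := c1
      have : A0 = [] := List.eq_nil_iff_forall_not_mem.2 hA0e
      rw [← this]
      exact hmemS A0 hA0
    have hinit_eq : init = family := by
      rw [hinit, PySem.Set.add_of_mem hempty_mem, PySem.Set.add_of_mem hO_mem]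
    have hcl : pvClosed O family := by
      constructor
      · intro A hA
        rw [hS, PySem.Set.mem_ofList, List.mem_map] at hA
        obtain ⟨A0, hA0, rfl⟩ := hA
        obtain ⟨C, hC, hEq⟩ := c3 A0 hA0
        have : pvCanon (PySem.Set.diff O (pvCanon A0)) = pvCanon C := by
          rw [pvCanon_eq_iff]
          intro x
          simp only [PySem.Set.mem_diff, pvCanon_mem, hO]
          rw [hEq x]
        rw [this]
        exact hmemS C hC
      · intro A hA B hB
        rw [hS, PySem.Set.mem_ofList, List.mem_map] at hA hB
        obtain ⟨A0, hA0, rfl⟩ := hA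
        obtain ⟨B0, hB0, rfl⟩ := hB
        obtain ⟨C, hC, hEq⟩ := c4 A0 hA0 B0 hB0
        have : pvCanon (PySem.Set.union (pvCanon A0) (pvCanon B0)) = pvCanon C := by
          rw [pvCanon_eq_iff]
          intro x
          simp only [PySem.Set.mem_union, pvCanon_mem]
          rw [hEq x]
        rw [this]
        exact hmemS C hC
    have hstep : pvStep O family = family :=
      pvFix_of_closed O family (PySem.Set.nodup_ofList _) hcl
    rw [hinit_eq, pvIter_ret O flen family (lt_irrefl flen) hstep fuel (by rw [hfuel]; omega)]
    rw [PySem.Set.equal_iff]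
    exact fun Y => Iff.rfl

-- ===== VERDICT (by name: the statement is the Claim_ definition above) =====
theorem is_sigma_algebra_spec : Claim_equal_is_sigma_algebra := by
  intro omega F _
  unfold Spec_is_sigma_algebra
  have := (pvA_iff omega F).trans (pvB_iff omega F).symm
  cases hA : is_sigma_algebra omega F <;> cases hB : is_sigma_algebra_alt omega F <;>
    simp_all
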